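-- pv_equiv track=rewrite | github.com/grzegorzsocha/advent_od_code_2022 | day_12/hill_climbing_algorithm_2.py | reogranise_input
-- ===== SOURCE A (Python) =====
-- def reogranise_input(input: list) -> tuple:
--     end = None
--     for i in range(len(input)):
--         for j in range(len(input[i])):
--             input[i][j] = ord(input[i][j])
--             if input[i][j] == 83:
--                 input[i][j] = 97
--             elif input[i][j] == 69:
--                 end = (i, j)
--                 input[i][j] = 122
--     return input, end
-- ===== SOURCE B (Python) =====
-- def reogranise_input(input: list) -> tuple:
--     positions = [(i, j)
--                  for i, row in enumerate(input)
--                  for j, c in enumerate(row)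
--                  if c == 'E']
--     end = positions[-1] if positions else None
--     for row in input:
--         row[:] = [97 if c == 'S' else 122 if c == 'E' else ord(c) for c in row]
--     return input, end
-- ===== Notes on version B (the rewrite author's own statement) =====
-- stated objective: simpler
-- what changed: Replaces A's single interleaved index loop (which converts cells and tracks the end while overwriting) by two clean passes: a comprehension collecting all 'E' positions with the last taken as end, then an in-place row conversion via a comprehension; both mutate the argument rows in place.
import Mathlib
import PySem

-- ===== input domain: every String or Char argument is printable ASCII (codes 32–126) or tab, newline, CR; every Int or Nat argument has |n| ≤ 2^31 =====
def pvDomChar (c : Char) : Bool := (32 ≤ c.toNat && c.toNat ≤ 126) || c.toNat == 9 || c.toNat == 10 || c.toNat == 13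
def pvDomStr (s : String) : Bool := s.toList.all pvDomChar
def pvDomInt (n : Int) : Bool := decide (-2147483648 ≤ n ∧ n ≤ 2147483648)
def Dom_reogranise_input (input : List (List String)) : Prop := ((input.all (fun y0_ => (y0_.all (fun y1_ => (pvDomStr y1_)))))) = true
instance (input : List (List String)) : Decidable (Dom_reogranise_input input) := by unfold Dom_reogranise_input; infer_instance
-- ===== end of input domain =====

-- B mutates the argument rows in place exactly as A does; the theorem below is about the returned value.

-- ===== PORT A =====
-- ord(s): exact for one-character strings; Python raises TypeError otherwise (excluded by Pre_)
def pvOrd (s : String) : Int :=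
  match s.toList with
  | [c] => (c.toNat : Int)
  | _ => 0

def reogranise_input (input : List (List String)) : List (List Int) × (Option (Int × Int)) :=
  (PySem.List.enumerate input 0).foldl
    (fun acc p =>
      let r := (PySem.List.enumerate p.2 0).foldl
        (fun st q =>
          let v := pvOrd q.2
          if v = 83 then (st.1 ++ [97], st.2)
          else if v = 69 then (st.1 ++ [122], some (p.1, q.1))
          else (st.1 ++ [v], st.2))
        ([], acc.2)
      (acc.1 ++ [r.1], r.2))
    ([], none)

-- ===== PORT B =====
def pvConvCell (s : String) : Int :=
  if s == "S" then 97 else if s == "E" then 122 else pvOrd s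

def reogranise_input_alt (input : List (List String)) : List (List Int) × (Option (Int × Int)) :=
  let positions := (PySem.List.enumerate input 0).flatMap (fun p =>
    ((PySem.List.enumerate p.2 0).filter (fun q => q.2 == "E")).map (fun q => (p.1, q.1)))
  let e := if positions.isEmpty then none else PySem.List.pyGet? positions (-1)
  (input.map (fun row => row.map pvConvCell), e)

-- ===== PRECONDITION & SPEC =====
-- Pre_ excludes exactly the inputs where A raises: ord(x) raises TypeError on any string of length ≠ 1.
def Pre_reogranise_input (input : List (List String)) : Prop :=
  ∀ row ∈ input, ∀ s ∈ row, s.toList.length = 1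
instance (input : List (List String)) : Decidable (Pre_reogranise_input input) := by
  unfold Pre_reogranise_input; infer_instance
def pvWitness_reogranise_input : List (List String) := [["S", "b"], ["E", "a"]]
def Spec_reogranise_input (input : List (List String)) (out : List (List Int) × (Option (Int × Int))) : Prop := out = reogranise_input_alt input
instance (input : List (List String)) (out : List (List Int) × (Option (Int × Int))) : Decidable (Spec_reogranise_input input out) := by unfold Spec_reogranise_input; infer_instance

-- ===== CLAIM (what is proved, stated in full; the proofs are below) =====
def Claim_equal_reogranise_input : Prop := ∀ (input : List (List String)), Dom_reogranise_input input → Pre_reogranise_input input → Spec_reogranise_input input (reogranise_input input)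

-- ===== LEMMAS AND PROOFS =====
theorem pv_getLast?_cons_or {α : Type} (a : α) (l : List α) :
    (a :: l).getLast? = l.getLast?.or (some a) := by
  induction l with
  | nil => rfl
  | cons b t ih => cases t <;> simp_all [List.getLast?]

theorem pv_str_eq_char (c : Char) (s : String) (d : Char) (hs : s.toList = [c])
    (t : String) (ht : t.toList = [d]) : (s = t) ↔ (c = d) := by
  constructor
  · intro h; subst h; rw [hs] at ht; exact (List.cons.injEq _ _ _ _).mp ht |>.1
  · intro h; apply String.toList_inj.mp; rw [hs, ht, h]

theorem pv_char_of_toNat (c : Char) (n : Nat) (h : c.toNat = n) : c = Char.ofNat n := by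
  have := Char.ofNat_toNat c; rw [h] at this; exact this.symm

theorem pv_cell_val (c : Char) (s : String) (hs : s.toList = [c]) :
    (if (c.toNat : Int) = 83 then (97 : Int)
     else if (c.toNat : Int) = 69 then 122 else (c.toNat : Int)) = pvConvCell s := by
  have hse : (s == "E") = decide (c = 'E') := by
    rw [show (s == "E") = decide (s = "E") from rfl]
    exact decide_eq_decide.mpr (pv_str_eq_char c s 'E' hs "E" rfl)
  have hss : (s == "S") = decide (c = 'S') := by
    rw [show (s == "S") = decide (s = "S") from rfl]
    exact decide_eq_decide.mpr (pv_str_eq_char c s 'S' hs "S" rfl)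
  have hE : ((c.toNat : Int) = 69) ↔ c = 'E' := by
    constructor
    · intro h; exact pv_char_of_toNat c 69 (by omega)
    · intro h; subst h; rfl
  have hS : ((c.toNat : Int) = 83) ↔ c = 'S' := by
    constructor
    · intro h; exact pv_char_of_toNat c 83 (by omega)
    · intro h; subst h; rfl
  simp only [pvConvCell, hse, hss, pvOrd, hs]
  by_cases h1 : c = 'S'
  · subst h1; simp
  · by_cases h2 : c = 'E'
    · subst h2; simp
    · simp [h1, h2, if_neg (hS.not.mpr h1), if_neg (hE.not.mpr h2)]

theorem pv_cell_isE (c : Char) (s : String) (hs : s.toList = [c]) :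
    ((c.toNat : Int) = 69) = ((s == "E") = true) := by
  have hse : (s == "E") = decide (c = 'E') := by
    rw [show (s == "E") = decide (s = "E") from rfl]
    exact decide_eq_decide.mpr (pv_str_eq_char c s 'E' hs "E" rfl)
  have hE : ((c.toNat : Int) = 69) ↔ c = 'E' := by
    constructor
    · intro h; exact pv_char_of_toNat c 69 (by omega)
    · intro h; subst h; rfl
  simp [hse, hE]

theorem pv_inner (i : Int) (row : List String)
    (h : ∀ s ∈ row, s.toList.length = 1) :
    ∀ (j : Int) (accL : List Int) (accE : Option (Int × Int)),
    (PySem.List.enumerate row j).foldl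
      (fun st q =>
        let v := pvOrd q.2
        if v = 83 then (st.1 ++ [97], st.2)
        else if v = 69 then (st.1 ++ [122], some (i, q.1))
        else (st.1 ++ [v], st.2))
      (accL, accE)
    = (accL ++ row.map pvConvCell,
       ((((PySem.List.enumerate row j).filter (fun q => q.2 == "E")).map
          (fun q => (i, q.1))).getLast?).or accE) := by
  induction row with
  | nil => intro j accL accE; simp [PySem.List.enumerate_nil]
  | cons s rest ih =>
    intro j accL accE
    have hs1 : s.toList.length = 1 := h s (by simp)
    obtain ⟨c, hc⟩ : ∃ c, s.toList = [c] := by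
      match hl : s.toList with
      | [c] => exact ⟨c, rfl⟩
      | [] => simp [hl] at hs1
      | _ :: _ :: _ => simp [hl] at hs1
    have hrest : ∀ x ∈ rest, x.toList.length = 1 := fun x hx => h x (by simp [hx])
    rw [PySem.List.enumerate_cons, List.foldl_cons]
    have hord : pvOrd s = (c.toNat : Int) := by simp [pvOrd, hc]
    by_cases hS : (c.toNat : Int) = 83
    · have hnotE : ¬ ((s == "E") = true) := by
        rw [← pv_cell_isE c s hc]; omega
      simp only [hord, if_pos hS]
      rw [ih hrest (j+1) (accL ++ [97]) accE]
      rw [List.filter_cons]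
      simp only [hnotE]
      have := pv_cell_val c s hc
      rw [if_pos hS] at this
      simp [List.append_assoc, ← this]
    · by_cases hE : (c.toNat : Int) = 69
      · have hisE : (s == "E") = true := by
          rw [← pv_cell_isE c s hc]; exact hE
        simp only [hord, if_neg hS, if_pos hE]
        rw [ih hrest (j+1) (accL ++ [122]) (some (i, j))]
        rw [List.filter_cons]
        simp only [hisE, if_pos]
        have := pv_cell_val c s hc
        rw [if_neg hS, if_pos hE] at this
        simp [pv_getLast?_cons_or, Option.some_or, List.append_assoc, ← this]
      · have hnotE : ¬ ((s == "E") = true) := by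
          rw [← pv_cell_isE c s hc]; exact hE
        simp only [hord, if_neg hS, if_neg hE]
        rw [ih hrest (j+1) (accL ++ [(c.toNat : Int)]) accE]
        rw [List.filter_cons]
        have := pv_cell_val c s hc
        rw [if_neg hS, if_neg hE] at this
        simp [List.append_assoc, ← this, hnotE]

theorem pv_outer (rows : List (List String))
    (h : ∀ row ∈ rows, ∀ s ∈ row, s.toList.length = 1) :
    ∀ (k : Int) (accL : List (List Int)) (accE : Option (Int × Int)),
    (PySem.List.enumerate rows k).foldl
      (fun acc p =>
        let r := (PySem.List.enumerate p.2 0).foldl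
          (fun st q =>
            let v := pvOrd q.2
            if v = 83 then (st.1 ++ [97], st.2)
            else if v = 69 then (st.1 ++ [122], some (p.1, q.1))
            else (st.1 ++ [v], st.2))
          ([], acc.2)
        (acc.1 ++ [r.1], r.2))
      (accL, accE)
    = (accL ++ rows.map (fun row => row.map pvConvCell),
       (((PySem.List.enumerate rows k).flatMap (fun p =>
          ((PySem.List.enumerate p.2 0).filter (fun q => q.2 == "E")).map
            (fun q => (p.1, q.1)))).getLast?).or accE) := by
  induction rows with
  | nil => intro k accL accE; simp [PySem.List.enumerate_nil]
  | cons row rest ih =>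
    intro k accL accE
    have hrow : ∀ s ∈ row, s.toList.length = 1 := h row (by simp)
    have hrest : ∀ r ∈ rest, ∀ s ∈ r, s.toList.length = 1 :=
      fun r hr => h r (by simp [hr])
    rw [PySem.List.enumerate_cons, List.foldl_cons]
    simp only
    rw [pv_inner k row hrow 0 [] accE]
    simp only [List.nil_append]
    have ih' := ih hrest (k+1) (accL ++ [row.map pvConvCell])
      (((((PySem.List.enumerate row 0).filter (fun q => q.2 == "E")).map
          (fun q => (k, q.1))).getLast?).or accE)
    simp only [] at ih'
    rw [ih']
    rw [List.flatMap_cons]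
    simp [List.getLast?_append, List.append_assoc, Option.or_assoc]

-- ===== VERDICT (by name: the statement is the Claim_ definition above) =====
theorem reogranise_input_spec : Claim_equal_reogranise_input := by
  intro input _ hpre
  unfold Spec_reogranise_input reogranise_input reogranise_input_alt
  rw [pv_outer input hpre 0 [] none]
  simp only [List.nil_append, Option.or_none]
  congr 1
  set ps := (PySem.List.enumerate input 0).flatMap (fun p =>
    ((PySem.List.enumerate p.2 0).filter (fun q => q.2 == "E")).map
      (fun q => (p.1, q.1))) with hps
  cases hp : ps with
  | nil => simp
  | cons a t => simp [PySem.List.pyGet?_neg_one]
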